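-- pv_equiv track=rewrite | github.com/elite42/gudbro-verticals | shared/database/cuisines/asian/vietnamese/scripts/generate-product-ingredients.py | assign_role
-- ===== SOURCE A (Python) =====
-- def assign_role(ingredient_id: str, index: int, total: int) -> str:
--     """Assign a role based on ingredient type and position."""
--     ing = ingredient_id.upper()
--
--     # Primary proteins
--     if any(x in ing for x in ['BEEF', 'PORK', 'CHICKEN', 'DUCK', 'SHRIMP', 'FISH', 'CRAB', 'SQUID', 'GOAT', 'TOFU']):
--         return 'main'
--
--     # Carbs/base
--     if any(x in ing for x in ['NOODLE', 'RICE', 'BAGUETTE', 'FLOUR', 'WRAPPER']):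
--         return 'base'
--
--     # Broth
--     if 'BONE' in ing or 'BROTH' in ing:
--         return 'base'
--
--     # Core aromatics
--     if any(x in ing for x in ['GARLIC', 'GINGER', 'ONION', 'SHALLOT', 'LEMONGRASS']):
--         return 'aromatic'
--
--     # Key sauces
--     if any(x in ing for x in ['FISH_SAUCE', 'SOY_SAUCE', 'HOISIN', 'OYSTER_SAUCE', 'NUOC_CHAM']):
--         return 'sauce'
--
--     # Herbs
--     if any(x in ing for x in ['MINT', 'BASIL', 'CILANTRO', 'CORIANDER', 'PERILLA', 'DILL']):
--         return 'garnish'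
--
--     # Vegetables as toppings
--     if any(x in ing for x in ['LETTUCE', 'BEAN_SPROUT', 'CUCUMBER', 'CARROT', 'CABBAGE', 'BANANA_BLOSSOM']):
--         return 'garnish'
--
--     # Spices
--     if any(x in ing for x in ['STAR_ANISE', 'CINNAMON', 'CARDAMOM', 'TURMERIC', 'PEPPER', 'CHILI', 'FIVE_SPICE']):
--         return 'spice'
--
--     # Condiments
--     if any(x in ing for x in ['LIME', 'VINEGAR', 'SUGAR', 'SALT', 'HONEY', 'CARAMEL']):
--         return 'optional'
--
--     # Oils
--     if 'OIL' in ing: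
--         return 'optional'
--
--     # Default
--     if index < 3:
--         return 'main'
--     elif index < 6:
--         return 'supporting'
--     else:
--         return 'optional'
-- ===== SOURCE B (Python) =====
-- # B: argmin over one flat keyword table - scan every keyword, keep the best
-- # (lowest-priority) hit in an accumulator, no early exit; index fallback if no hit.
-- FLAT = [
--     ('BEEF', 0, 'main'), ('PORK', 0, 'main'), ('CHICKEN', 0, 'main'),
--     ('DUCK', 0, 'main'), ('SHRIMP', 0, 'main'), ('FISH', 0, 'main'),
--     ('CRAB', 0, 'main'), ('SQUID', 0, 'main'), ('GOAT', 0, 'main'),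
--     ('TOFU', 0, 'main'),
--     ('NOODLE', 1, 'base'), ('RICE', 1, 'base'), ('BAGUETTE', 1, 'base'),
--     ('FLOUR', 1, 'base'), ('WRAPPER', 1, 'base'),
--     ('BONE', 2, 'base'), ('BROTH', 2, 'base'),
--     ('GARLIC', 3, 'aromatic'), ('GINGER', 3, 'aromatic'), ('ONION', 3, 'aromatic'),
--     ('SHALLOT', 3, 'aromatic'), ('LEMONGRASS', 3, 'aromatic'),
--     ('FISH_SAUCE', 4, 'sauce'), ('SOY_SAUCE', 4, 'sauce'), ('HOISIN', 4, 'sauce'),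
--     ('OYSTER_SAUCE', 4, 'sauce'), ('NUOC_CHAM', 4, 'sauce'),
--     ('MINT', 5, 'garnish'), ('BASIL', 5, 'garnish'), ('CILANTRO', 5, 'garnish'),
--     ('CORIANDER', 5, 'garnish'), ('PERILLA', 5, 'garnish'), ('DILL', 5, 'garnish'),
--     ('LETTUCE', 6, 'garnish'), ('BEAN_SPROUT', 6, 'garnish'), ('CUCUMBER', 6, 'garnish'),
--     ('CARROT', 6, 'garnish'), ('CABBAGE', 6, 'garnish'), ('BANANA_BLOSSOM', 6, 'garnish'),
--     ('STAR_ANISE', 7, 'spice'), ('CINNAMON', 7, 'spice'), ('CARDAMOM', 7, 'spice'),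
--     ('TURMERIC', 7, 'spice'), ('PEPPER', 7, 'spice'), ('CHILI', 7, 'spice'),
--     ('FIVE_SPICE', 7, 'spice'),
--     ('LIME', 8, 'optional'), ('VINEGAR', 8, 'optional'), ('SUGAR', 8, 'optional'),
--     ('SALT', 8, 'optional'), ('HONEY', 8, 'optional'), ('CARAMEL', 8, 'optional'),
--     ('OIL', 9, 'optional'),
-- ]
--
--
-- def assign_role(ingredient_id: str, index: int, total: int) -> str:
--     ing = ingredient_id.upper()
--     best = None
--     for kw, prio, role in FLAT:
--         if kw in ing and (best is None or prio < best[0]):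
--             best = (prio, role)
--     if best is not None:
--         return best[1]
--     return 'main' if index < 3 else 'supporting' if index < 6 else 'optional'
-- ===== Notes on version B (the rewrite author's own statement) =====
-- stated objective: alternative
-- what changed: B replaces A's ten early-return keyword-group branches with a single full scan over one flat (keyword, priority, role) table that keeps an argmin-by-priority accumulator and falls back on the index only if no keyword matched.
import Mathlib
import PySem

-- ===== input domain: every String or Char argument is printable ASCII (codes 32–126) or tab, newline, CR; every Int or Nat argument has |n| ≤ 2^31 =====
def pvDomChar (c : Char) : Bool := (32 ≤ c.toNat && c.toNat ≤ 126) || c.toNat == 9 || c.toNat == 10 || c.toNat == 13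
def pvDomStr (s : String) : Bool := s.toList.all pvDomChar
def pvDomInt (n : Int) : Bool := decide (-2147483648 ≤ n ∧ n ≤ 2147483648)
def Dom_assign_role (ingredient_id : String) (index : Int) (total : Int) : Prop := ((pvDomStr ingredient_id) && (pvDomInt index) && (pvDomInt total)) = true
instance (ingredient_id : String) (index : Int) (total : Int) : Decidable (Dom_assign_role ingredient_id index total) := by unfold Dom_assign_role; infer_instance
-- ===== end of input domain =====

-- B replaces A's ten early-return branches with a full scan of one flat keyword table keeping an argmin-by-priority accumulator (objective: alternative).

-- ===== PORT A =====
def assign_role (ingredient_id : String) (index : Int) (total : Int) : String :=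
  let ing := PySem.Str.upper ingredient_id
  if (["BEEF", "PORK", "CHICKEN", "DUCK", "SHRIMP", "FISH", "CRAB", "SQUID", "GOAT", "TOFU"].any fun x => PySem.Str.isIn x ing) then "main"
  else if (["NOODLE", "RICE", "BAGUETTE", "FLOUR", "WRAPPER"].any fun x => PySem.Str.isIn x ing) then "base"
  else if PySem.Str.isIn "BONE" ing || PySem.Str.isIn "BROTH" ing then "base"
  else if (["GARLIC", "GINGER", "ONION", "SHALLOT", "LEMONGRASS"].any fun x => PySem.Str.isIn x ing) then "aromatic"
  else if (["FISH_SAUCE", "SOY_SAUCE", "HOISIN", "OYSTER_SAUCE", "NUOC_CHAM"].any fun x => PySem.Str.isIn x ing) then "sauce"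
  else if (["MINT", "BASIL", "CILANTRO", "CORIANDER", "PERILLA", "DILL"].any fun x => PySem.Str.isIn x ing) then "garnish"
  else if (["LETTUCE", "BEAN_SPROUT", "CUCUMBER", "CARROT", "CABBAGE", "BANANA_BLOSSOM"].any fun x => PySem.Str.isIn x ing) then "garnish"
  else if (["STAR_ANISE", "CINNAMON", "CARDAMOM", "TURMERIC", "PEPPER", "CHILI", "FIVE_SPICE"].any fun x => PySem.Str.isIn x ing) then "spice"
  else if (["LIME", "VINEGAR", "SUGAR", "SALT", "HONEY", "CARAMEL"].any fun x => PySem.Str.isIn x ing) then "optional"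
  else if PySem.Str.isIn "OIL" ing then "optional"
  else if index < 3 then "main"
  else if index < 6 then "supporting"
  else "optional"

-- ===== PORT B =====
-- flat table of (keyword, priority, role)
def pvFlat : List (String × Nat × String) :=
  [ ("BEEF", 0, "main"), ("PORK", 0, "main"), ("CHICKEN", 0, "main"),
    ("DUCK", 0, "main"), ("SHRIMP", 0, "main"), ("FISH", 0, "main"),
    ("CRAB", 0, "main"), ("SQUID", 0, "main"), ("GOAT", 0, "main"),
    ("TOFU", 0, "main"),
    ("NOODLE", 1, "base"), ("RICE", 1, "base"), ("BAGUETTE", 1, "base"),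
    ("FLOUR", 1, "base"), ("WRAPPER", 1, "base"),
    ("BONE", 2, "base"), ("BROTH", 2, "base"),
    ("GARLIC", 3, "aromatic"), ("GINGER", 3, "aromatic"), ("ONION", 3, "aromatic"),
    ("SHALLOT", 3, "aromatic"), ("LEMONGRASS", 3, "aromatic"),
    ("FISH_SAUCE", 4, "sauce"), ("SOY_SAUCE", 4, "sauce"), ("HOISIN", 4, "sauce"),
    ("OYSTER_SAUCE", 4, "sauce"), ("NUOC_CHAM", 4, "sauce"),
    ("MINT", 5, "garnish"), ("BASIL", 5, "garnish"), ("CILANTRO", 5, "garnish"),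
    ("CORIANDER", 5, "garnish"), ("PERILLA", 5, "garnish"), ("DILL", 5, "garnish"),
    ("LETTUCE", 6, "garnish"), ("BEAN_SPROUT", 6, "garnish"), ("CUCUMBER", 6, "garnish"),
    ("CARROT", 6, "garnish"), ("CABBAGE", 6, "garnish"), ("BANANA_BLOSSOM", 6, "garnish"),
    ("STAR_ANISE", 7, "spice"), ("CINNAMON", 7, "spice"), ("CARDAMOM", 7, "spice"),
    ("TURMERIC", 7, "spice"), ("PEPPER", 7, "spice"), ("CHILI", 7, "spice"),
    ("FIVE_SPICE", 7, "spice"),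
    ("LIME", 8, "optional"), ("VINEGAR", 8, "optional"), ("SUGAR", 8, "optional"),
    ("SALT", 8, "optional"), ("HONEY", 8, "optional"), ("CARAMEL", 8, "optional"),
    ("OIL", 9, "optional") ]

-- one iteration of B's loop: update `best` if the keyword matches and beats it
def pvStep (ing : String) (best : Option (Nat × String)) (e : String × Nat × String) : Option (Nat × String) :=
  if PySem.Str.isIn e.1 ing && best.all (fun b => decide (e.2.1 < b.1)) then some e.2 else best

def assign_role_alt (ingredient_id : String) (index : Int) (total : Int) : String :=
  let ing := PySem.Str.upper ingredient_id
  match pvFlat.foldl (pvStep ing) none with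
  | some (_, r) => r
  | none => if index < 3 then "main" else if index < 6 then "supporting" else "optional"

-- ===== PRECONDITION & SPEC =====
def Spec_assign_role (ingredient_id : String) (index : Int) (total : Int) (out : String) : Prop := out = assign_role_alt ingredient_id index total
instance (ingredient_id : String) (index : Int) (total : Int) (out : String) : Decidable (Spec_assign_role ingredient_id index total out) := by unfold Spec_assign_role; infer_instance

-- ===== CLAIM =====
def Claim_equal_assign_role : Prop := ∀ (ingredient_id : String) (index : Int) (total : Int), Dom_assign_role ingredient_id index total → Spec_assign_role ingredient_id index total (assign_role ingredient_id index total)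

-- ===== LEMMAS AND PROOFS =====

-- a priority group of the table
def pvG (p : Nat) (r : String) (kws : List String) : List (String × Nat × String) :=
  kws.map (fun k => (k, p, r))

-- everything in a group and beyond stays at priority ≥ p
theorem pvG_bound (p q : Nat) (r : String) (kws : List String)
    (rest : List (String × Nat × String)) (hpq : p ≤ q)
    (hrest : ∀ e ∈ rest, p ≤ e.2.1) : ∀ e ∈ pvG q r kws ++ rest, p ≤ e.2.1 := by
  intro e he
  rcases List.mem_append.mp he with h1 | h2
  · obtain ⟨k, _, rfl⟩ := List.mem_map.mp h1; exact hpq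
  · exact hrest e h2

-- once best holds a priority ≤ every remaining priority, the fold never changes it
theorem pvFrozen (ing : String) (l : List (String × Nat × String)) (q : Nat) (r : String)
    (h : ∀ e ∈ l, q ≤ e.2.1) :
    l.foldl (pvStep ing) (some (q, r)) = some (q, r) := by
  induction l with
  | nil => rfl
  | cons e t ih =>
      have hq : ¬ e.2.1 < q := Nat.not_lt.mpr (h e (by simp))
      have hstep : pvStep ing (some (q, r)) e = some (q, r) := by
        simp [pvStep, hq]
      simp only [List.foldl_cons, hstep]
      exact ih (fun e he => h e (by simp [he]))

-- folding over one priority-p group followed by higher-priority rules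
theorem pvFoldGroup (ing : String) (kws : List String) (p : Nat) (r : String)
    (rest : List (String × Nat × String)) (h : ∀ e ∈ rest, p ≤ e.2.1) :
    ((pvG p r kws) ++ rest).foldl (pvStep ing) none =
      if kws.any (fun k => PySem.Str.isIn k ing) then some (p, r)
      else rest.foldl (pvStep ing) none := by
  unfold pvG
  induction kws with
  | nil => simp
  | cons k t ih =>
      simp only [List.map_cons, List.cons_append, List.foldl_cons, List.any_cons]
      by_cases hk : PySem.Str.isIn k ing = true
      · have hstep : pvStep ing none (k, p, r) = some (p, r) := by
          simp only [pvStep, hk, Option.all_none, Bool.and_true, if_true]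
        rw [hstep, pvFrozen ing _ p r]
        · simp only [hk, Bool.true_or, if_true]
        · intro e he
          rcases List.mem_append.mp he with h1 | h2
          · obtain ⟨k', _, rfl⟩ := List.mem_map.mp h1; exact le_refl p
          · exact h e h2
      · have hk' : PySem.Str.isIn k ing = false := Bool.eq_false_iff.mpr hk
        have hstep : pvStep ing none (k, p, r) = none := by
          simp only [pvStep, hk', Option.all_none, Bool.and_true]; rfl
        rw [hstep, ih]
        simp only [hk', Bool.false_or]

-- the ten-way branch, abstracted over the ten match booleans
theorem pvChain (c0 c1 c2 c3 c4 c5 c6 c7 c8 c9 : Bool) (index : Int) :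
    (if c0 = true then "main"
     else if c1 = true then "base"
     else if c2 = true then "base"
     else if c3 = true then "aromatic"
     else if c4 = true then "sauce"
     else if c5 = true then "garnish"
     else if c6 = true then "garnish"
     else if c7 = true then "spice"
     else if c8 = true then "optional"
     else if c9 = true then "optional"
     else if index < 3 then "main" else if index < 6 then "supporting" else "optional")
    =
    (match (if c0 = true then some ((0 : Nat), "main")
      else if c1 = true then some ((1 : Nat), "base")
      else if c2 = true then some ((2 : Nat), "base")
      else if c3 = true then some ((3 : Nat), "aromatic")
      else if c4 = true then some ((4 : Nat), "sauce")
      else if c5 = true then some ((5 : Nat), "garnish")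
      else if c6 = true then some ((6 : Nat), "garnish")
      else if c7 = true then some ((7 : Nat), "spice")
      else if c8 = true then some ((8 : Nat), "optional")
      else if c9 = true then some ((9 : Nat), "optional")
      else none) with
    | some (_, r) => r
    | none => if index < 3 then "main" else if index < 6 then "supporting" else "optional") := by
  cases c0 with
  | true => rfl
  | false => cases c1 with
    | true => rfl
    | false => cases c2 with
      | true => rfl
      | false => cases c3 with
        | true => rfl
        | false => cases c4 with
          | true => rfl
          | false => cases c5 with
            | true => rfl
            | false => cases c6 with
              | true => rfl
              | false => cases c7 with
                | true => rfl
                | false => cases c8 with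
                  | true => rfl
                  | false => cases c9 with
                    | true => rfl
                    | false => rfl

-- ===== VERDICT =====
set_option maxHeartbeats 1000000 in
theorem assign_role_spec : Claim_equal_assign_role := by
  intro ingredient_id index total _
  unfold Spec_assign_role
  simp only [assign_role, assign_role_alt]
  generalize PySem.Str.upper ingredient_id = ing
  have hflat : pvFlat = pvG 0 "main" ["BEEF", "PORK", "CHICKEN", "DUCK", "SHRIMP", "FISH", "CRAB", "SQUID", "GOAT", "TOFU"] ++ (pvG 1 "base" ["NOODLE", "RICE", "BAGUETTE", "FLOUR", "WRAPPER"] ++ (pvG 2 "base" ["BONE", "BROTH"] ++ (pvG 3 "aromatic" ["GARLIC", "GINGER", "ONION", "SHALLOT", "LEMONGRASS"] ++ (pvG 4 "sauce" ["FISH_SAUCE", "SOY_SAUCE", "HOISIN", "OYSTER_SAUCE", "NUOC_CHAM"] ++ (pvG 5 "garnish" ["MINT", "BASIL", "CILANTRO", "CORIANDER", "PERILLA", "DILL"] ++ (pvG 6 "garnish" ["LETTUCE", "BEAN_SPROUT", "CUCUMBER", "CARROT", "CABBAGE", "BANANA_BLOSSOM"] ++ (pvG 7 "spice" ["STAR_ANISE",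 "CINNAMON", "CARDAMOM", "TURMERIC", "PEPPER", "CHILI", "FIVE_SPICE"] ++ (pvG 8 "optional" ["LIME", "VINEGAR", "SUGAR", "SALT", "HONEY", "CARAMEL"] ++ (pvG 9 "optional" ["OIL"] ++ (([] : List (String × Nat × String)))))))))))) := by rfl
  have S10 : ∀ e ∈ ([] : List (String × Nat × String)), 10 ≤ e.2.1 := by simp
  have S9 := pvG_bound 9 9 "optional" ["OIL"] _ le_rfl (fun e he => Nat.le_of_succ_le (S10 e he))
  have S8 := pvG_bound 8 8 "optional" ["LIME", "VINEGAR", "SUGAR", "SALT", "HONEY", "CARAMEL"] _ le_rfl (fun e he => Nat.le_of_succ_le (S9 e he))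
  have S7 := pvG_bound 7 7 "spice" ["STAR_ANISE", "CINNAMON", "CARDAMOM", "TURMERIC", "PEPPER", "CHILI", "FIVE_SPICE"] _ le_rfl (fun e he => Nat.le_of_succ_le (S8 e he))
  have S6 := pvG_bound 6 6 "garnish" ["LETTUCE", "BEAN_SPROUT", "CUCUMBER", "CARROT", "CABBAGE", "BANANA_BLOSSOM"] _ le_rfl (fun e he => Nat.le_of_succ_le (S7 e he))
  have S5 := pvG_bound 5 5 "garnish" ["MINT", "BASIL", "CILANTRO", "CORIANDER", "PERILLA", "DILL"] _ le_rfl (fun e he => Nat.le_of_succ_le (S6 e he))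
  have S4 := pvG_bound 4 4 "sauce" ["FISH_SAUCE", "SOY_SAUCE", "HOISIN", "OYSTER_SAUCE", "NUOC_CHAM"] _ le_rfl (fun e he => Nat.le_of_succ_le (S5 e he))
  have S3 := pvG_bound 3 3 "aromatic" ["GARLIC", "GINGER", "ONION", "SHALLOT", "LEMONGRASS"] _ le_rfl (fun e he => Nat.le_of_succ_le (S4 e he))
  have S2 := pvG_bound 2 2 "base" ["BONE", "BROTH"] _ le_rfl (fun e he => Nat.le_of_succ_le (S3 e he))
  have S1 := pvG_bound 1 1 "base" ["NOODLE", "RICE", "BAGUETTE", "FLOUR", "WRAPPER"] _ le_rfl (fun e he => Nat.le_of_succ_le (S2 e he))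
  rw [hflat,
    pvFoldGroup ing _ 0 "main" _ (fun e he => Nat.le_of_succ_le (S1 e he)),
    pvFoldGroup ing _ 1 "base" _ (fun e he => Nat.le_of_succ_le (S2 e he)),
    pvFoldGroup ing _ 2 "base" _ (fun e he => Nat.le_of_succ_le (S3 e he)),
    pvFoldGroup ing _ 3 "aromatic" _ (fun e he => Nat.le_of_succ_le (S4 e he)),
    pvFoldGroup ing _ 4 "sauce" _ (fun e he => Nat.le_of_succ_le (S5 e he)),
    pvFoldGroup ing _ 5 "garnish" _ (fun e he => Nat.le_of_succ_le (S6 e he)),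
    pvFoldGroup ing _ 6 "garnish" _ (fun e he => Nat.le_of_succ_le (S7 e he)),
    pvFoldGroup ing _ 7 "spice" _ (fun e he => Nat.le_of_succ_le (S8 e he)),
    pvFoldGroup ing _ 8 "optional" _ (fun e he => Nat.le_of_succ_le (S9 e he)),
    pvFoldGroup ing _ 9 "optional" _ (fun e he => Nat.le_of_succ_le (S10 e he))]
  rw [List.foldl_nil,
    show (PySem.Str.isIn "BONE" ing || PySem.Str.isIn "BROTH" ing)
        = (["BONE", "BROTH"].any fun x => PySem.Str.isIn x ing) from by
      rw [List.any_cons, List.any_cons, List.any_nil, Bool.or_false],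
    show (PySem.Str.isIn "OIL" ing)
        = (["OIL"].any fun x => PySem.Str.isIn x ing) from by
      rw [List.any_cons, List.any_nil, Bool.or_false]]
  exact pvChain _ _ _ _ _ _ _ _ _ _ index
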